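-- pv_equiv track=rewrite | github.com/LynxLenior/FinalProject | PyMemory/Main.py | create_card_positions
-- ===== SOURCE A (Python) =====
-- CARD_SIZE = 100
--
-- MARGIN = 20
--
-- def create_card_positions(size):
--     # store the positions of the cards in a list
--     positions = []
--     for column in range(size):
--         for row in range(size):
--             if size == 5 and column == 2 and row == 2:
--                 continue  # skip the middle position for 5x5 grid
--             x = MARGIN + row * (CARD_SIZE + MARGIN)
--             y = MARGIN + column * (CARD_SIZE + MARGIN)
--             positions.append((x, y))
--     # the positions would return a list of tuples with x and y coordinates
--     # the formula is MARGIN = 20 + column/row index * (CARD_SIZE = 100 + MARGIN = 20)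
--     # e.g., [(20, 20), (140, 20), (260, 20), ...] for the 4x4 grid it's 16 positions
--     # while the 5x5 grid would return 24 positions (one skipped in the middle)
--     return positions # return the list of card positions
-- ===== SOURCE B (Python) =====
-- CARD_SIZE = 100
--
-- MARGIN = 20
--
-- def create_card_positions(size):
--     # Flat-index formulation: walk one flat counter over the number of cards and
--     # recover (column, row) by divmod; for the 5x5 grid the card count is one
--     # less and flat indices at or past the removed middle cell (12) shift by one.
--     if size <= 0:
--         return []
--     step = CARD_SIZE + MARGIN
--     count = size * size - (1 if size == 5 else 0)
--     positions = []
--     for k in range(count):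
--         j = k + 1 if size == 5 and k >= 12 else k
--         column, row = divmod(j, size)
--         positions.append((MARGIN + row * step, MARGIN + column * step))
--     return positions
-- ===== Notes on version B (the rewrite author's own statement) =====
-- stated objective: alternative
-- what changed: B replaces A's nested column/row loops with a single flat loop over the card count, recovering (column, row) from the flat index by divmod, with the 5x5 middle-cell removal expressed as an index shift instead of an inline skip.
import Mathlib
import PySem

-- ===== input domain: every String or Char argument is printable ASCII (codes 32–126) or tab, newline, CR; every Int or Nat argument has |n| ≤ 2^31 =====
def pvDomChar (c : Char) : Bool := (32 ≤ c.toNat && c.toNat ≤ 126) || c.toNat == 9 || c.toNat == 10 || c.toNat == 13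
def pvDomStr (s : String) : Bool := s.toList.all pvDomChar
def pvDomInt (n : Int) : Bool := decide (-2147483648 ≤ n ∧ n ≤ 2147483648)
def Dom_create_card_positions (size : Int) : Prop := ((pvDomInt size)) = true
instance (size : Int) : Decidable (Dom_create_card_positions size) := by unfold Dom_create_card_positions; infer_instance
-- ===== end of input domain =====

-- B enumerates one flat index over the card count and recovers (column,row) by divmod, instead of A's nested loops with an inline skip; objective: alternative.


-- ===== PORT A =====
def create_card_positions (size : Int) : List (Int × Int) :=
  (PySem.List.pyRange 0 size 1).foldl (fun positions column =>
    (PySem.List.pyRange 0 size 1).foldl (fun positions row =>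
      if size = 5 ∧ column = 2 ∧ row = 2 then positions
      else
        let x := 20 + row * (100 + 20)
        let y := 20 + column * (100 + 20)
        positions ++ [(x, y)]) positions) []

-- ===== PORT B =====
def create_card_positions_alt (size : Int) : List (Int × Int) :=
  if size ≤ 0 then []
  else
    let step := 100 + 20
    let count := size * size - (if size = 5 then 1 else 0)
    (PySem.List.pyRange 0 count 1).foldl (fun positions k =>
      let j := if size = 5 ∧ 12 ≤ k then k + 1 else k
      let column := PySem.Int.floordiv j size
      let row := PySem.Int.mod j size
      positions ++ [(20 + row * step, 20 + column * step)]) []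

-- ===== PRECONDITION & SPEC =====
def Spec_create_card_positions (size : Int) (out : List (Int × Int)) : Prop := out = create_card_positions_alt size
instance (size : Int) (out : List (Int × Int)) : Decidable (Spec_create_card_positions size out) := by unfold Spec_create_card_positions; infer_instance

-- ===== CLAIM =====
def Claim_equal_create_card_positions : Prop := ∀ (size : Int), Dom_create_card_positions size → Spec_create_card_positions size (create_card_positions size)

-- ===== LEMMAS AND PROOFS =====

-- A shifted range is the zero-based range mapped by the shift.
theorem pyRange_shift (a n : Int) :
    PySem.List.pyRange a (a + n) 1 = (PySem.List.pyRange 0 n 1).map (fun k => a + k) := by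
  rw [PySem.List.pyRange_one, PySem.List.pyRange_one]
  simp [List.map_map, Function.comp]

-- range(0, m*n) splits into m consecutive blocks of length n (0 ≤ m, 0 ≤ n).
theorem pyRange_mul_decompose (n : Int) (hn : 0 ≤ n) (m : Nat) :
    PySem.List.pyRange 0 (m * n) 1 =
      (PySem.List.pyRange 0 (m : Int) 1).flatMap
        (fun c => (PySem.List.pyRange 0 n 1).map (fun r => c * n + r)) := by
  induction m with
  | zero => simp [PySem.List.pyRange_one_eq_nil]
  | succ m ih =>
    have h1 : ((m : Int) + 1) * n = m * n + n := by ring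
    have h2 : PySem.List.pyRange 0 (((m : Nat) + 1 : Nat) * n) 1 =
        PySem.List.pyRange 0 ((m : Int) * n) 1 ++ PySem.List.pyRange ((m : Int) * n) ((m : Int) * n + n) 1 := by
      push_cast
      rw [h1]
      have ha : (0:Int) ≤ (m : Int) * n := mul_nonneg (by positivity) hn
      exact PySem.List.pyRange_one_append 0 ((m : Int) * n) ((m : Int) * n + n) ha (by linarith)
    rw [h2, ih, pyRange_shift ((m : Int) * n) n]
    have h3 : PySem.List.pyRange 0 (((m : Nat) + 1 : Nat) : Int) 1 =
        PySem.List.pyRange 0 (m : Int) 1 ++ [(m : Int)] := by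
      push_cast
      exact PySem.List.pyRange_one_succ_right (by positivity)
    rw [h3]
    simp [List.flatMap_append]

theorem floordiv_block (n c r : Int) (hn : 0 < n) (hr0 : 0 ≤ r) (hrn : r < n) :
    PySem.Int.floordiv (c * n + r) n = c := by
  rw [PySem.Int.floordiv_eq_iff_of_pos hn]
  constructor
  · linarith
  · nlinarith

theorem mod_block (n c r : Int) (hn : 0 < n) (hr0 : 0 ≤ r) (hrn : r < n) :
    PySem.Int.mod (c * n + r) n = r := by
  have h := PySem.Int.floordiv_mul_add_mod (c * n + r) n
  rw [floordiv_block n c r hn hr0 hrn] at h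
  linarith

-- When size ≠ 5 and 0 < size, A's nested loops and B's flat divmod loop agree.
theorem eq_of_pos_ne_five (size : Int) (hpos : 0 < size) (h5 : size ≠ 5) :
    create_card_positions size = create_card_positions_alt size := by
  unfold create_card_positions create_card_positions_alt
  rw [if_neg (by omega : ¬ size ≤ 0)]
  simp only [if_neg h5]
  -- A side: remove the dead skip branch, turn folds into flatMap of map
  have hA : (PySem.List.pyRange 0 size 1).foldl (fun positions column =>
      (PySem.List.pyRange 0 size 1).foldl (fun positions row =>
        if size = 5 ∧ column = 2 ∧ row = 2 then positions
        else positions ++ [(20 + row * (100 + 20), 20 + column * (100 + 20))]) positions) []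
      = (PySem.List.pyRange 0 size 1).flatMap (fun column =>
          (PySem.List.pyRange 0 size 1).map (fun row => (20 + row * (100 + 20), 20 + column * (100 + 20)))) := by
    have hfun : (fun (positions : List (Int × Int)) (column : Int) =>
        (PySem.List.pyRange 0 size 1).foldl (fun positions row =>
          if size = 5 ∧ column = 2 ∧ row = 2 then positions
          else positions ++ [(20 + row * (100 + 20), 20 + column * (100 + 20))]) positions)
        = (fun positions column =>
            positions ++ (PySem.List.pyRange 0 size 1).map
              (fun row => (20 + row * (100 + 20), 20 + column * (100 + 20)))) := by
      funext positions column
      have hstep : (fun (positions : List (Int × Int)) (row : Int) =>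
          if size = 5 ∧ column = 2 ∧ row = 2 then positions
          else positions ++ [(20 + row * (100 + 20), 20 + column * (100 + 20))])
          = (fun positions row =>
              positions ++ [(20 + row * (100 + 20), 20 + column * (100 + 20))]) := by
        funext p r
        exact if_neg (fun hc => h5 hc.1)
      rw [hstep]
      exact PySem.List.foldl_append_singleton_eq_map _ _ _
    rw [hfun]
    simpa using PySem.List.foldl_append_eq_flatMap
      (fun column => (PySem.List.pyRange 0 size 1).map
        (fun row => (20 + row * (100 + 20), 20 + column * (100 + 20))))
      (PySem.List.pyRange 0 size 1) ([] : List (Int × Int))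
  -- B side: the shift never fires (size ≠ 5), fold becomes a map
  have hBfun : (fun (positions : List (Int × Int)) (k : Int) =>
      let j := if size = 5 ∧ 12 ≤ k then k + 1 else k
      let column := PySem.Int.floordiv j size
      let row := PySem.Int.mod j size
      positions ++ [(20 + row * (100 + 20), 20 + column * (100 + 20))])
      = (fun positions k => positions ++
          [(20 + PySem.Int.mod k size * (100 + 20), 20 + PySem.Int.floordiv k size * (100 + 20))]) := by
    funext p k
    simp only
    rw [if_neg (fun hc => h5 hc.1)]
  rw [hA, hBfun, PySem.List.foldl_append_singleton_eq_map]
  -- decompose the flat range into size blocks of size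
  obtain ⟨m, hm⟩ : ∃ m : Nat, size = (m : Int) := ⟨size.toNat, by omega⟩
  subst hm
  simp only [List.nil_append, sub_zero]
  rw [show ((m : Int) * m) = ((m : Nat) : Int) * ((m : Int)) from by ring]
  rw [pyRange_mul_decompose (m : Int) (by positivity) m]
  rw [List.map_flatMap]
  refine List.flatMap_congr ?_
  intro c hc
  rw [List.map_map]
  refine List.map_congr_left ?_
  intro r hr
  rw [PySem.List.mem_pyRange_one] at hr
  simp only [Function.comp]
  rw [floordiv_block (m : Int) c r hpos hr.1 hr.2, mod_block (m : Int) c r hpos hr.1 hr.2]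

-- ===== VERDICT =====
theorem create_card_positions_spec : Claim_equal_create_card_positions := by
  intro size _
  unfold Spec_create_card_positions
  by_cases h0 : size ≤ 0
  · unfold create_card_positions create_card_positions_alt
    rw [if_pos h0, PySem.List.pyRange_one_eq_nil h0]
    rfl
  · by_cases h5 : size = 5
    · subst h5; decide
    · exact eq_of_pos_ne_five size (by omega) h5
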